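-- pv_equiv track=rewrite | github.com/csgear/competitive | usaco/chapter1/skidesign.py | solve
-- ===== SOURCE A (Python) =====
-- def solve(hills):
--     min_cost = float('inf')
--
--     # Try all possible ranges of size 17
--     for min_height in range(84):  # 0 to 83
--         max_height = min_height + 17
--         cost = 0
--
--         # Calculate cost for this range
--         for hill in hills:
--             if hill < min_height:
--                 # Cost to increase height
--                 diff = min_height - hill
--                 cost += diff * diff
--             elif hill > max_height:
--                 # Cost to decrease height
--                 diff = hill - max_height
--                 cost += diff * diff
--
--         min_cost = min(min_cost, cost)
--
--     return min_cost
-- ===== SOURCE B (Python) =====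
-- def _bisect_left(s, x, lo, hi):
--     if lo < hi:
--         mid = (lo + hi) // 2
--         if s[mid] < x:
--             return _bisect_left(s, x, mid + 1, hi)
--         return _bisect_left(s, x, lo, mid)
--     return lo
--
--
-- def _bisect_right(s, x, lo, hi):
--     if lo < hi:
--         mid = (lo + hi) // 2
--         if s[mid] <= x:
--             return _bisect_right(s, x, mid + 1, hi)
--         return _bisect_right(s, x, lo, mid)
--     return lo
--
--
-- def _window_cost(s, p1, p2, n, b):
--     t = b + 17
--     k = _bisect_left(s, b, 0, n)
--     m = _bisect_right(s, t, 0, n)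
--     low = k * b * b - 2 * b * p1[k] + p2[k]
--     high = (p2[n] - p2[m]) - 2 * t * (p1[n] - p1[m]) + (n - m) * t * t
--     return low + high
--
--
-- def solve(hills):
--     s = sorted(hills)
--     n = len(s)
--     p1 = [0]
--     p2 = [0]
--     for h in s:
--         p1.append(p1[-1] + h)
--         p2.append(p2[-1] + h * h)
--     best = _window_cost(s, p1, p2, n, 0)
--     for b in range(1, 84):
--         best = min(best, _window_cost(s, p1, p2, n, b))
--     return best
-- ===== Notes on version B (the rewrite author's own statement) =====
-- stated objective: faster
-- what changed: Instead of rescanning all hills for each of the 84 windows, B sorts the hills once, builds prefix sums of values and squared values, and computes each window's cost in O(log n) via two hand-written binary searches and the closed-form expansion of the squared-distance sums.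
import Mathlib
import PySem

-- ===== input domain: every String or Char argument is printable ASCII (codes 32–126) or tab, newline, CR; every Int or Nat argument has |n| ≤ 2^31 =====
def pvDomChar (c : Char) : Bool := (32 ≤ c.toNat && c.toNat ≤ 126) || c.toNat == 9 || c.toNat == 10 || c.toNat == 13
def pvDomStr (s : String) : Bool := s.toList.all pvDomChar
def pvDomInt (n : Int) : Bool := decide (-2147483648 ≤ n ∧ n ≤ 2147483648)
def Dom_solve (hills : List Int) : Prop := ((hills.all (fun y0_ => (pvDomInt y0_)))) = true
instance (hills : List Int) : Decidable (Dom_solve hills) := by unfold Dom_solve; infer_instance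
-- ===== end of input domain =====

-- B replaces A's 84 full scans of the hills by sort + prefix sums + binary search per window
-- (objective: faster; per-window work becomes O(log n) instead of O(n)).


-- ===== PORT A =====
-- float('inf') is modelled as `none`; `min(inf, cost)` with an Int cost is `cost`,
-- and since range(84) is nonempty the accumulator is always `some` at the end
-- (the final `.getD 0` is unreachable dead default).
def solve (hills : List Int) : Int :=
  ((PySem.List.pyRange 0 84 1).foldl
    (fun (min_cost : Option Int) (min_height : Int) =>
      let max_height := min_height + 17
      let cost := hills.foldl
        (fun cost hill =>
          if hill < min_height then cost + (min_height - hill) * (min_height - hill)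
          else if hill > max_height then cost + (hill - max_height) * (hill - max_height)
          else cost) 0
      match min_cost with
      | none => some cost
      | some m => some (min m cost)) none).getD 0

-- ===== PORT B =====
-- hand-written recursive binary searches of Source B; s[mid] is in range (lo ≤ mid < hi ≤ len s),
-- so `List.getD _ _ 0` is exact there
def bl (s : List Int) (x : Int) (lo hi : Nat) : Nat :=
  if h : lo < hi then
    let mid := (lo + hi) / 2
    if s.getD mid 0 < x then bl s x (mid + 1) hi
    else bl s x lo mid
  else lo
termination_by hi - lo
decreasing_by all_goals omega

def br (s : List Int) (x : Int) (lo hi : Nat) : Nat :=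
  if h : lo < hi then
    let mid := (lo + hi) / 2
    if s.getD mid 0 ≤ x then br s x (mid + 1) hi
    else br s x lo mid
  else lo
termination_by hi - lo
decreasing_by all_goals omega

-- p1/p2 indexing in Source B is always in range (k, m ≤ n and the lists have length n+1),
-- so `List.getD _ _ 0` is exact
def windowCost (s p1 p2 : List Int) (n : Nat) (b : Int) : Int :=
  let t := b + 17
  let k := bl s b 0 n
  let m := br s t 0 n
  let low := (k : Int) * b * b - 2 * b * p1.getD k 0 + p2.getD k 0
  let high := (p2.getD n 0 - p2.getD m 0) - 2 * t * (p1.getD n 0 - p1.getD m 0)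
              + ((n : Int) - (m : Int)) * t * t
  low + high

-- p1[-1] / p2[-1]: the accumulator lists are never empty (they start as [0]),
-- so `getLastD _ 0` is exact
def pstep (pq : List Int × List Int) (h : Int) : List Int × List Int :=
  (pq.1 ++ [pq.1.getLastD 0 + h], pq.2 ++ [pq.2.getLastD 0 + h * h])

def solve_alt (hills : List Int) : Int :=
  let s := PySem.List.sorted hills (fun x => x) false
  let n := s.length
  let pp := s.foldl pstep ([0], [0])
  let best := windowCost s pp.1 pp.2 n 0
  (PySem.List.pyRange 1 84 1).foldl (fun best b => min best (windowCost s pp.1 pp.2 n b)) best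

-- ===== PRECONDITION & SPEC =====
def Spec_solve (hills : List Int) (out : Int) : Prop := out = solve_alt hills
instance (hills : List Int) (out : Int) : Decidable (Spec_solve hills out) := by unfold Spec_solve; infer_instance

-- ===== CLAIM (what is proved, stated in full; the proofs are below) =====
def Claim_equal_solve : Prop := ∀ (hills : List Int), Dom_solve hills → Spec_solve hills (solve hills)

-- ===== LEMMAS AND PROOFS =====


-- ---- binary search: the returned index is a cut point of the sorted list ----

theorem bl_cut (s : List Int) (x : Int) (hs : List.Pairwise (· ≤ ·) s) :
    ∀ (d lo hi : Nat), hi - lo ≤ d → lo ≤ hi → hi ≤ s.length →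
    (∀ j (hj : j < s.length), j < lo → s[j] < x) →
    (∀ j (hj : j < s.length), hi ≤ j → x ≤ s[j]) →
    bl s x lo hi ≤ s.length ∧
    (∀ j (hj : j < s.length), j < bl s x lo hi → s[j] < x) ∧
    (∀ j (hj : j < s.length), bl s x lo hi ≤ j → x ≤ s[j]) := by
  intro d
  induction d with
  | zero =>
    intro lo hi hd hlh hhn hlow hhigh
    have : lo = hi := by omega
    subst this
    rw [bl]
    simp only [lt_irrefl, dite_false]
    exact ⟨hhn, hlow, hhigh⟩
  | succ d ih =>
    intro lo hi hd hlh hhn hlow hhigh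
    rw [bl]
    by_cases h : lo < hi
    · simp only [h, dite_true]
      have hmid1 : lo ≤ (lo + hi) / 2 := by omega
      have hmid2 : (lo + hi) / 2 < hi := by omega
      have hmidn : (lo + hi) / 2 < s.length := by omega
      have hget : s.getD ((lo + hi) / 2) 0 = s[(lo + hi) / 2] :=
        List.getD_eq_getElem s 0 hmidn
      have hmono : ∀ i j (hi' : i < s.length) (hj' : j < s.length), i ≤ j → s[i] ≤ s[j] := by
        intro i j hi' hj' hij
        rcases Nat.lt_or_ge i j with hlt | hge
        · exact (List.pairwise_iff_getElem.mp hs) i j hi' hj' hlt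
        · have : i = j := by omega
          subst this; exact le_refl _
      by_cases hc : s.getD ((lo + hi) / 2) 0 < x
      · simp only [hc, if_true]
        apply ih ((lo + hi) / 2 + 1) hi (by omega) (by omega) hhn
        · intro j hj hjlt
          have : s[j] ≤ s[(lo + hi) / 2] := hmono j _ hj hmidn (by omega)
          calc s[j] ≤ s[(lo + hi) / 2] := this
            _ < x := by rw [hget] at hc; exact hc
        · exact hhigh
      · simp only [hc, if_false]
        apply ih lo ((lo + hi) / 2) (by omega) (by omega) (by omega) hlow
        intro j hj hjge
        have hx : x ≤ s[(lo + hi) / 2] := by rw [hget] at hc; omega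
        calc x ≤ s[(lo + hi) / 2] := hx
          _ ≤ s[j] := hmono _ j hmidn hj hjge
    · simp only [h, dite_false]
      refine ⟨by omega, hlow, ?_⟩
      intro j hj hjge
      exact hhigh j hj (by omega)

theorem br_cut (s : List Int) (x : Int) (hs : List.Pairwise (· ≤ ·) s) :
    ∀ (d lo hi : Nat), hi - lo ≤ d → lo ≤ hi → hi ≤ s.length →
    (∀ j (hj : j < s.length), j < lo → s[j] ≤ x) →
    (∀ j (hj : j < s.length), hi ≤ j → x < s[j]) →
    br s x lo hi ≤ s.length ∧
    (∀ j (hj : j < s.length), j < br s x lo hi → s[j] ≤ x) ∧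
    (∀ j (hj : j < s.length), br s x lo hi ≤ j → x < s[j]) := by
  intro d
  induction d with
  | zero =>
    intro lo hi hd hlh hhn hlow hhigh
    have : lo = hi := by omega
    subst this
    rw [br]
    simp only [lt_irrefl, dite_false]
    exact ⟨hhn, hlow, hhigh⟩
  | succ d ih =>
    intro lo hi hd hlh hhn hlow hhigh
    rw [br]
    by_cases h : lo < hi
    · simp only [h, dite_true]
      have hmid2 : (lo + hi) / 2 < hi := by omega
      have hmidn : (lo + hi) / 2 < s.length := by omega
      have hget : s.getD ((lo + hi) / 2) 0 = s[(lo + hi) / 2] :=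
        List.getD_eq_getElem s 0 hmidn
      have hmono : ∀ i j (hi' : i < s.length) (hj' : j < s.length), i ≤ j → s[i] ≤ s[j] := by
        intro i j hi' hj' hij
        rcases Nat.lt_or_ge i j with hlt | hge
        · exact (List.pairwise_iff_getElem.mp hs) i j hi' hj' hlt
        · have : i = j := by omega
          subst this; exact le_refl _
      by_cases hc : s.getD ((lo + hi) / 2) 0 ≤ x
      · simp only [hc, if_true]
        apply ih ((lo + hi) / 2 + 1) hi (by omega) (by omega) hhn
        · intro j hj hjlt
          calc s[j] ≤ s[(lo + hi) / 2] := hmono j _ hj hmidn (by omega)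
            _ ≤ x := by rw [hget] at hc; exact hc
        · exact hhigh
      · simp only [hc, if_false]
        apply ih lo ((lo + hi) / 2) (by omega) (by omega) (by omega) hlow
        intro j hj hjge
        calc x < s[(lo + hi) / 2] := by rw [hget] at hc; omega
          _ ≤ s[j] := hmono _ j hmidn hj hjge
    · simp only [h, dite_false]
      refine ⟨by omega, hlow, ?_⟩
      intro j hj hjge
      exact hhigh j hj (by omega)

-- ---- cut point ⇒ filter is a take / a drop ----

theorem filter_lt_eq_take (s : List Int) (x : Int) (r : Nat) (hr : r ≤ s.length)
    (h1 : ∀ j (hj : j < s.length), j < r → s[j] < x)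
    (h2 : ∀ j (hj : j < s.length), r ≤ j → x ≤ s[j]) :
    s.filter (fun h => decide (h < x)) = s.take r := by
  conv_lhs => rw [← List.take_append_drop r s]
  rw [List.filter_append]
  have ht : (s.take r).filter (fun h => decide (h < x)) = s.take r := by
    rw [List.filter_eq_self]
    intro a ha
    obtain ⟨i, hi, hia⟩ := List.mem_iff_getElem.mp ha
    have hir : i < r := by
      have := hi; simp [List.length_take] at this; omega
    have hil : i < s.length := by omega
    have : (s.take r)[i] = s[i] := List.getElem_take
    rw [this] at hia
    subst hia
    simpa using h1 i hil hir
  have hd : (s.drop r).filter (fun h => decide (h < x)) = [] := by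
    rw [List.filter_eq_nil_iff]
    intro a ha
    obtain ⟨i, hi, hia⟩ := List.mem_iff_getElem.mp ha
    have hil : r + i < s.length := by
      have := hi; simp [List.length_drop] at this; omega
    have : (s.drop r)[i] = s[r + i] := List.getElem_drop
    rw [this] at hia
    subst hia
    have := h2 (r + i) hil (by omega)
    simp; omega
  rw [ht, hd, List.append_nil]

theorem filter_gt_eq_drop (s : List Int) (x : Int) (m : Nat) (hm : m ≤ s.length)
    (h1 : ∀ j (hj : j < s.length), j < m → s[j] ≤ x)
    (h2 : ∀ j (hj : j < s.length), m ≤ j → x < s[j]) :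
    s.filter (fun h => decide (x < h)) = s.drop m := by
  conv_lhs => rw [← List.take_append_drop m s]
  rw [List.filter_append]
  have ht : (s.take m).filter (fun h => decide (x < h)) = [] := by
    rw [List.filter_eq_nil_iff]
    intro a ha
    obtain ⟨i, hi, hia⟩ := List.mem_iff_getElem.mp ha
    have hir : i < m := by
      have := hi; simp [List.length_take] at this; omega
    have hil : i < s.length := by omega
    have : (s.take m)[i] = s[i] := List.getElem_take
    rw [this] at hia
    subst hia
    have := h1 i hil hir
    simp; omega
  have hd : (s.drop m).filter (fun h => decide (x < h)) = s.drop m := by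
    rw [List.filter_eq_self]
    intro a ha
    obtain ⟨i, hi, hia⟩ := List.mem_iff_getElem.mp ha
    have hil : m + i < s.length := by
      have := hi; simp [List.length_drop] at this; omega
    have : (s.drop m)[i] = s[m + i] := List.getElem_drop
    rw [this] at hia
    subst hia
    simpa using h2 (m + i) hil (by omega)
  rw [ht, hd, List.nil_append]

-- ---- splitting the piecewise cost sum into the two tails ----

theorem cost_split (b : Int) (l : List Int) :
    (l.map (fun h => if h < b then (b - h) * (b - h)
                     else if h > b + 17 then (h - (b + 17)) * (h - (b + 17))
                     else 0)).sum
    = ((l.filter (fun h => decide (h < b))).map (fun h => (b - h) * (b - h))).sum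
      + ((l.filter (fun h => decide (b + 17 < h))).map (fun h => (h - (b + 17)) * (h - (b + 17)))).sum := by
  induction l with
  | nil => simp
  | cons a l ih =>
    by_cases h1 : a < b
    · have e1 : decide (a < b) = true := by simp [h1]
      have e2 : decide (b + 17 < a) = false := by simp; omega
      simp only [List.map_cons, List.sum_cons, List.filter_cons, e1, e2, Bool.false_eq_true, if_true, if_false,
        if_pos h1, List.map_cons, List.sum_cons]
      rw [ih]; ring
    · by_cases h2 : a > b + 17
      · have e1 : decide (a < b) = false := by simp [h1]
        have e2 : decide (b + 17 < a) = true := by simp [h2]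
        simp only [List.map_cons, List.sum_cons, List.filter_cons, e1, e2, Bool.false_eq_true, if_true, if_false,
          if_neg h1, if_pos h2, List.map_cons, List.sum_cons]
        rw [ih]; ring
      · have e1 : decide (a < b) = false := by simp [h1]
        have e2 : decide (b + 17 < a) = false := by simp; omega
        simp only [List.map_cons, List.sum_cons, List.filter_cons, e1, e2, Bool.false_eq_true, if_false,
          if_neg h1, if_neg h2]
        rw [ih]; ring

-- ---- closed form of a tail's squared-distance sum ----

theorem sq_sum_lo (c : Int) (l : List Int) :
    ((l.map (fun h => (c - h) * (c - h))).sum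
      = (l.length : Int) * c * c - 2 * c * l.sum + (l.map (fun h => h * h)).sum) := by
  induction l with
  | nil => simp
  | cons a l ih =>
    simp only [List.map_cons, List.sum_cons, List.length_cons]
    rw [ih]; push_cast; ring

theorem sq_sum_hi (c : Int) (l : List Int) :
    ((l.map (fun h => (h - c) * (h - c))).sum
      = (l.length : Int) * c * c - 2 * c * l.sum + (l.map (fun h => h * h)).sum) := by
  have : (l.map (fun h => (h - c) * (h - c))) = (l.map (fun h => (c - h) * (c - h))) := by
    apply List.map_congr_left; intro a _; ring
  rw [this, sq_sum_lo]

-- ---- the prefix-sum lists ----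

theorem pstep_foldl (s : List Int) :
    s.foldl pstep ([0], [0])
      = ((List.range (s.length + 1)).map (fun i => (s.take i).sum),
         (List.range (s.length + 1)).map (fun i => ((s.take i).map (fun h => h * h)).sum)) := by
  induction s using List.reverseRecOn with
  | nil => simp [List.range_succ]
  | append_singleton s a ih =>
    rw [List.foldl_append, ih]
    simp only [List.foldl_cons, List.foldl_nil, pstep]
    have hlast1 : ((List.range (s.length + 1)).map (fun i => (s.take i).sum)).getLastD 0
        = s.sum := by
      rw [List.range_succ, List.map_append]
      simp
    have hlast2 : ((List.range (s.length + 1)).map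
          (fun i => ((s.take i).map (fun h => h * h)).sum)).getLastD 0
        = (s.map (fun h => h * h)).sum := by
      rw [List.range_succ, List.map_append]
      simp [List.take_of_length_le]
    rw [hlast1, hlast2]
    have hlen : (s ++ [a]).length + 1 = (s.length + 1) + 1 := by simp
    refine Prod.ext ?_ ?_
    · show (List.range (s.length + 1)).map (fun i => (s.take i).sum) ++ [s.sum + a]
        = (List.range ((s ++ [a]).length + 1)).map (fun i => ((s ++ [a]).take i).sum)
      rw [hlen]
      conv_rhs => rw [List.range_succ, List.map_append]
      congr 1
      · apply List.map_congr_left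
        intro i hi
        have hle : i <= s.length := Nat.lt_succ_iff.mp (List.mem_range.mp hi)
        rw [List.take_append_of_le_length hle]
      · simp [List.take_of_length_le]
    · show (List.range (s.length + 1)).map (fun i => ((s.take i).map (fun h => h * h)).sum)
          ++ [(s.map (fun h => h * h)).sum + a * a]
        = (List.range ((s ++ [a]).length + 1)).map
            (fun i => (((s ++ [a]).take i).map (fun h => h * h)).sum)
      rw [hlen]
      conv_rhs => rw [List.range_succ, List.map_append]
      congr 1
      · apply List.map_congr_left
        intro i hi
        have hle : i <= s.length := Nat.lt_succ_iff.mp (List.mem_range.mp hi)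
        rw [List.take_append_of_le_length hle]
      · simp [List.take_of_length_le]

theorem prefix1_getD (s : List Int) (k : Nat) (hk : k ≤ s.length) :
    (s.foldl pstep ([0], [0])).1.getD k 0 = (s.take k).sum := by
  rw [pstep_foldl]
  exact PySem.List.getD_map_range _ _ _ _ (by omega)

theorem prefix2_getD (s : List Int) (k : Nat) (hk : k ≤ s.length) :
    (s.foldl pstep ([0], [0])).2.getD k 0 = ((s.take k).map (fun h => h * h)).sum := by
  rw [pstep_foldl]
  exact PySem.List.getD_map_range _ _ _ _ (by omega)

-- ---- the per-window equality: A's scan = B's closed form ----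

theorem window_eq (hills : List Int) (b : Int) :
    (hills.foldl (fun cost hill =>
        if hill < b then cost + (b - hill) * (b - hill)
        else if hill > b + 17 then cost + (hill - (b + 17)) * (hill - (b + 17))
        else cost) 0)
    = windowCost (PySem.List.sorted hills (fun x => x) false)
        ((PySem.List.sorted hills (fun x => x) false).foldl pstep ([0], [0])).1
        ((PySem.List.sorted hills (fun x => x) false).foldl pstep ([0], [0])).2
        (PySem.List.sorted hills (fun x => x) false).length b := by
  set s := PySem.List.sorted hills (fun x => x) false with hsdef
  have hperm : s.Perm hills := PySem.List.sorted_perm hills (fun x => x) false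
  have hs : List.Pairwise (· ≤ ·) s := PySem.List.sorted_pairwise hills (fun x => x)
  -- A's scan as a sum of the piecewise cost
  have hbody : (hills.foldl (fun cost hill =>
        if hill < b then cost + (b - hill) * (b - hill)
        else if hill > b + 17 then cost + (hill - (b + 17)) * (hill - (b + 17))
        else cost) 0)
      = (hills.map (fun h => if h < b then (b - h) * (b - h)
          else if h > b + 17 then (h - (b + 17)) * (h - (b + 17)) else 0)).sum := by
    have : (fun (cost : Int) (hill : Int) =>
        if hill < b then cost + (b - hill) * (b - hill)
        else if hill > b + 17 then cost + (hill - (b + 17)) * (hill - (b + 17))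
        else cost)
      = (fun (cost : Int) (hill : Int) => cost +
          (if hill < b then (b - hill) * (b - hill)
           else if hill > b + 17 then (hill - (b + 17)) * (hill - (b + 17)) else 0)) := by
      funext cost hill
      split_ifs <;> ring
    rw [this, PySem.List.foldl_add]
    ring
  rw [hbody]
  have hpermsum : (hills.map (fun h => if h < b then (b - h) * (b - h)
        else if h > b + 17 then (h - (b + 17)) * (h - (b + 17)) else 0)).sum
      = (s.map (fun h => if h < b then (b - h) * (b - h)
        else if h > b + 17 then (h - (b + 17)) * (h - (b + 17)) else 0)).sum :=
    (List.Perm.sum_eq (List.Perm.map _ hperm)).symm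
  rw [hpermsum, cost_split]
  -- the two bisection cut points
  obtain ⟨hk1, hk2, hk3⟩ := bl_cut s b hs s.length 0 s.length (by omega) (by omega) (le_refl _)
    (by intro j hj hlt; omega) (by intro j hj hge; omega)
  obtain ⟨hm1, hm2, hm3⟩ := br_cut s (b + 17) hs s.length 0 s.length (by omega) (by omega)
    (le_refl _) (by intro j hj hlt; omega) (by intro j hj hge; omega)
  rw [filter_lt_eq_take s b (bl s b 0 s.length) hk1 hk2 hk3,
      filter_gt_eq_drop s (b + 17) (br s (b + 17) 0 s.length) hm1 hm2 hm3]
  rw [sq_sum_lo, sq_sum_hi]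
  -- evaluate B's closed form
  simp only [windowCost]
  rw [prefix1_getD s _ hk1, prefix2_getD s _ hk1, prefix1_getD s _ hm1, prefix2_getD s _ hm1,
      prefix1_getD s s.length (le_refl _), prefix2_getD s s.length (le_refl _)]
  simp only [List.take_length]
  -- take/drop bookkeeping for the high tail
  have hsplit : (s.take (br s (b + 17) 0 s.length)).sum + (s.drop (br s (b + 17) 0 s.length)).sum
      = s.sum := by
    conv_rhs => rw [<- List.take_append_drop (br s (b + 17) 0 s.length) s]
    rw [List.sum_append]
  have hsplit2 : ((s.take (br s (b + 17) 0 s.length)).map (fun h => h * h)).sum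
        + ((s.drop (br s (b + 17) 0 s.length)).map (fun h => h * h)).sum
      = (s.map (fun h => h * h)).sum := by
    conv_rhs => rw [<- List.take_append_drop (br s (b + 17) 0 s.length) s]
    rw [List.map_append, List.sum_append]
  have hd1 : (s.drop (br s (b + 17) 0 s.length)).sum
      = s.sum - (s.take (br s (b + 17) 0 s.length)).sum := by omega
  have hd2 : ((s.drop (br s (b + 17) 0 s.length)).map (fun h => h * h)).sum
      = (s.map (fun h => h * h)).sum
        - ((s.take (br s (b + 17) 0 s.length)).map (fun h => h * h)).sum := by omega
  have hlen1 : ((s.take (bl s b 0 s.length)).length : Int) = ((bl s b 0 s.length) : Int) := by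
    simp [List.length_take]; omega
  have hlen2 : ((s.drop (br s (b + 17) 0 s.length)).length : Int)
      = (s.length : Int) - ((br s (b + 17) 0 s.length) : Int) := by
    simp [List.length_drop]; omega
  rw [hd1, hd2, hlen1, hlen2]
  ring

-- ---- folding min over the windows: A's Option accumulator = B's seeded fold ----

theorem minrange (c : Int → Int) (N : Nat) :
    (PySem.List.pyRange 0 ((N : Int) + 1) 1).foldl (fun (o : Option Int) b =>
        match o with
        | none => some (c b)
        | some m => some (min m (c b))) none
      = some ((PySem.List.pyRange 1 ((N : Int) + 1) 1).foldl (fun m b => min m (c b)) (c 0)) := by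
  induction N with
  | zero =>
    rw [show ((0 : Nat) : Int) + 1 = 0 + 1 by norm_num, PySem.List.pyRange_one_singleton,
        show (0 : Int) + 1 = 1 by norm_num, PySem.List.pyRange_one_eq_nil (le_refl 1)]
    simp
  | succ N ih =>
    have h1 : ((N + 1 : Nat) : Int) + 1 = (((N : Int) + 1)) + 1 := by push_cast; ring
    rw [h1, PySem.List.pyRange_one_succ_right (by positivity),
        PySem.List.pyRange_one_succ_right (by omega : (1 : Int) ≤ (N : Int) + 1),
        List.foldl_append, List.foldl_append, ih]
    simp

-- ===== VERDICT (by name: the statement is the Claim_ definition above) =====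
theorem solve_spec : Claim_equal_solve := by
  unfold Claim_equal_solve
  intro hills _
  unfold Spec_solve
  simp only [solve, solve_alt]
  have hb : (fun (min_cost : Option Int) (min_height : Int) =>
      match min_cost with
      | none => some (hills.foldl
          (fun cost hill =>
            if hill < min_height then cost + (min_height - hill) * (min_height - hill)
            else if hill > min_height + 17 then
              cost + (hill - (min_height + 17)) * (hill - (min_height + 17))
            else cost) 0)
      | some m => some (min m (hills.foldl
          (fun cost hill =>
            if hill < min_height then cost + (min_height - hill) * (min_height - hill)
            else if hill > min_height + 17 then
              cost + (hill - (min_height + 17)) * (hill - (min_height + 17))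
            else cost) 0)))
    = (fun (o : Option Int) (b : Int) =>
      match o with
      | none => some (windowCost (PySem.List.sorted hills (fun x => x) false)
          ((PySem.List.sorted hills (fun x => x) false).foldl pstep ([0], [0])).1
          ((PySem.List.sorted hills (fun x => x) false).foldl pstep ([0], [0])).2
          (PySem.List.sorted hills (fun x => x) false).length b)
      | some m => some (min m (windowCost (PySem.List.sorted hills (fun x => x) false)
          ((PySem.List.sorted hills (fun x => x) false).foldl pstep ([0], [0])).1
          ((PySem.List.sorted hills (fun x => x) false).foldl pstep ([0], [0])).2
          (PySem.List.sorted hills (fun x => x) false).length b))) := by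
    funext o b
    rw [window_eq hills b]
  rw [hb]
  rw [show (84 : Int) = ((83 : Nat) : Int) + 1 by norm_num]
  rw [minrange (fun b => windowCost (PySem.List.sorted hills (fun x => x) false)
      ((PySem.List.sorted hills (fun x => x) false).foldl pstep ([0], [0])).1
      ((PySem.List.sorted hills (fun x => x) false).foldl pstep ([0], [0])).2
      (PySem.List.sorted hills (fun x => x) false).length b) 83]
  simp
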